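-- pv_equiv track=rewrite | github.com/FNTwin/cluster_margin | cluster_margin/utils.py | round_robin_sampling
-- ===== SOURCE A (Python) =====
-- def round_robin_sampling(k):
--     cluster_list = [["A", "B", "C"], ["D", "E"], ["F"], ["1", "3", "2", "3"], ["KDKDKD"]]
--     cluster_list.sort(key=lambda x: len(x))
--     index_select = []
--     cluster_index = 0
--     while k > 0:
--         if len(cluster_list[cluster_index]) > 0:
--             index_select.append(cluster_list[cluster_index].pop(0))
--             k -= 1
--         if cluster_index < len(cluster_list) - 1:
--             cluster_index += 1
--         else:
--             if len(cluster_list[cluster_index]) == 0:  # escape condition if k > number of clusters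
--                 break
--             cluster_index = 0
--     return index_select
-- ===== SOURCE B (Python) =====
-- def round_robin_sampling(k):
--     cluster_list = [["A", "B", "C"], ["D", "E"], ["F"], ["1", "3", "2", "3"], ["KDKDKD"]]
--     if k <= 0:
--         return []
--     clusters = sorted(cluster_list, key=len)
--     width = max(len(c) for c in clusters)
--     flat = [c[i] for i in range(width) for c in clusters if i < len(c)]
--     return flat[:k]
-- ===== Notes on version B (the rewrite author's own statement) =====
-- stated objective: simpler
-- what changed: Replaces A's stateful while-loop (cluster pointer, pop(0), decrementing k, explicit break) by sorting the clusters and transposing them into rounds with one comprehension, then slicing the flattened round-robin sequence to the first k (after an explicit k <= 0 guard).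
import Mathlib
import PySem

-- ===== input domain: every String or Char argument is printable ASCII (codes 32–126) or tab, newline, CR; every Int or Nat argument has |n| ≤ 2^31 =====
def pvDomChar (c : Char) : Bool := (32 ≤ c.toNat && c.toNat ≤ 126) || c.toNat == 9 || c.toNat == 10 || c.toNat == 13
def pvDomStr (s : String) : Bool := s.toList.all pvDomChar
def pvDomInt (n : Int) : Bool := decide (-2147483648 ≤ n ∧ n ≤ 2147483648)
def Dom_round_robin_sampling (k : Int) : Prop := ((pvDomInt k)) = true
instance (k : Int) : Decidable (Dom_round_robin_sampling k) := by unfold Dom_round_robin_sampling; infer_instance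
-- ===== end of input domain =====

-- B replaces A's index-pointer while-loop (with pop(0)) by a transpose-and-flatten of the
-- sorted clusters into rounds, sliced to the first k; objective: simpler. A mutates only its
-- own local list, so the return value is the whole observable behaviour.

-- ===== PORT A =====
-- The while-loop, step for step; `fuel` is only a totality guard (the loop always breaks or
-- exhausts k within far fewer than 100 iterations, proved via rrLoop_congr below).
-- Python's cluster_list[cluster_index] is always in range here; getD [] is exact on that domain.
def rrLoop : Nat → List (List String) → Nat → Int → List String → List String
  | 0, _, _, _, acc => acc
  | fuel + 1, clusters, idx, k, acc =>
    if 0 < k then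
      let c := clusters.getD idx []
      let clusters' := if 0 < c.length then clusters.set idx c.tail else clusters
      let k' := if 0 < c.length then k - 1 else k
      let acc' := if 0 < c.length then acc ++ [c.headI] else acc
      if idx < clusters.length - 1 then rrLoop fuel clusters' (idx + 1) k' acc'
      else if (clusters'.getD idx []).length = 0 then acc'
      else rrLoop fuel clusters' 0 k' acc'
    else acc

def round_robin_sampling (k : Int) : List String :=
  let cluster_list : List (List String) :=
    [["A", "B", "C"], ["D", "E"], ["F"], ["1", "3", "2", "3"], ["KDKDKD"]]
  let sortedClusters := PySem.List.sorted cluster_list (fun x => (x.length : Int)) false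
  rrLoop 100 sortedClusters 0 k []

-- ===== PORT B =====
def round_robin_sampling_alt (k : Int) : List String :=
  let cluster_list : List (List String) :=
    [["A", "B", "C"], ["D", "E"], ["F"], ["1", "3", "2", "3"], ["KDKDKD"]]
  if k ≤ 0 then []
  else
    let clusters := PySem.List.sorted cluster_list (fun c => (c.length : Int)) false
    -- max over a nonempty literal list; the getD default is never used
    let width := (PySem.List.max? (clusters.map (fun c => (c.length : Int))) (fun x => x)).getD 0
    let flat := (PySem.List.pyRange 0 width 1).flatMap (fun i =>
      (clusters.filter (fun c => i < (c.length : Int))).map (fun c => PySem.List.pyGetD c i ""))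
    PySem.List.slice flat none (some k)

-- ===== PRECONDITION & SPEC =====
def Spec_round_robin_sampling (k : Int) (out : List String) : Prop := out = round_robin_sampling_alt k
instance (k : Int) (out : List String) : Decidable (Spec_round_robin_sampling k out) := by unfold Spec_round_robin_sampling; infer_instance

-- ===== CLAIM (what is proved, stated in full; the proofs are below) =====
def Claim_equal_round_robin_sampling : Prop := ∀ (k : Int), Dom_round_robin_sampling k → Spec_round_robin_sampling k (round_robin_sampling k)

-- ===== LEMMAS AND PROOFS =====

def totLen (clusters : List (List String)) : Nat := (clusters.map List.length).sum

lemma totLen_zero_getD (clusters : List (List String)) (idx : Nat)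
    (h : totLen clusters = 0) : clusters.getD idx [] = [] := by
  induction clusters generalizing idx with
  | nil => cases idx <;> rfl
  | cons c t ih =>
    simp [totLen] at h
    cases idx with
    | zero => simpa [List.getD] using h.1
    | succ j => simpa [List.getD] using ih j (by simp [totLen, h.2])

lemma getD_cons_lt (clusters : List (List String)) (idx : Nat) (x : String) (rest : List String)
    (h : clusters.getD idx [] = x :: rest) : idx < clusters.length := by
  by_contra hge
  rw [List.getD_eq_getElem?_getD, List.getElem?_eq_none (by omega)] at h
  simp at h

lemma totLen_set (clusters : List (List String)) (idx : Nat) (ys : List String)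
    (h : idx < clusters.length) :
    totLen (clusters.set idx ys) + (clusters.getD idx []).length = totLen clusters + ys.length := by
  induction clusters generalizing idx with
  | nil => simp at h
  | cons c t ih =>
    cases idx with
    | zero => simp [totLen, List.getD]; omega
    | succ j =>
      have := ih j (by simpa using h)
      simp [totLen, List.getD] at this ⊢
      omega

lemma rrLoop_nonpos (fuel : Nat) (clusters : List (List String)) (idx : Nat) (k : Int)
    (acc : List String) (h : k ≤ 0) : rrLoop fuel clusters idx k acc = acc := by
  cases fuel with
  | zero => rfl
  | succ f => rw [rrLoop, if_neg (by omega)]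

lemma rrLoop_tot_zero (fuel : Nat) (clusters : List (List String)) (idx : Nat) (k : Int)
    (acc : List String) (h : totLen clusters = 0) (hf : clusters.length - idx < fuel) :
    rrLoop fuel clusters idx k acc = acc := by
  induction fuel generalizing idx with
  | zero => omega
  | succ f ih =>
    by_cases hk : 0 < k
    · have hc : clusters.getD idx [] = [] := totLen_zero_getD _ _ h
      rw [rrLoop, if_pos hk]
      simp only [hc, List.length_nil, lt_self_iff_false, if_false]
      split_ifs with h1
      · exact ih (idx + 1) (by omega)
      · rfl
    · exact rrLoop_nonpos _ _ _ _ _ (by omega)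

lemma rrLoop_congr (fuel : Nat) (clusters : List (List String)) (idx : Nat) (k1 k2 : Int)
    (acc : List String) (ha : (totLen clusters : Int) ≤ k1) (hb : (totLen clusters : Int) ≤ k2)
    (hf : totLen clusters * (clusters.length + 1) + (clusters.length - idx) < fuel) :
    rrLoop fuel clusters idx k1 acc = rrLoop fuel clusters idx k2 acc := by
  induction fuel generalizing clusters idx k1 k2 acc with
  | zero => omega
  | succ f ih =>
    by_cases htot : totLen clusters = 0
    · rw [rrLoop_tot_zero _ _ _ _ _ htot (by omega), rrLoop_tot_zero _ _ _ _ _ htot (by omega)]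
    · have hk1 : 0 < k1 := by omega
      have hk2 : 0 < k2 := by omega
      rw [rrLoop, rrLoop, if_pos hk1, if_pos hk2]
      cases hc : clusters.getD idx [] with
      | nil =>
        simp only [hc, List.length_nil, lt_self_iff_false, if_false]
        split_ifs with h1
        · exact ih _ _ _ _ _ ha hb (by omega)
        · rfl
      | cons x rest =>
        have hlt : idx < clusters.length := getD_cons_lt _ _ _ _ hc
        have hset := totLen_set clusters idx rest hlt
        rw [hc] at hset
        simp only [List.length_cons] at hset
        have heq : totLen (clusters.set idx rest) + 1 = totLen clusters := by omega
        have hmul := congrArg (· * (clusters.length + 1)) heq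
        simp only [Nat.add_mul, one_mul] at hmul
        simp only [List.length_cons, Nat.zero_lt_succ, if_pos, List.tail_cons,
          List.headI_cons]
        split_ifs with h1 h2
        · exact ih _ _ _ _ _ (by omega) (by omega)
            (by simp only [List.length_set]; omega)
        · rfl
        · exact ih _ _ _ _ _ (by omega) (by omega)
            (by simp only [List.length_set]; omega)

lemma a_big (k : Int) (h : 11 ≤ k) :
    round_robin_sampling k = ["F", "KDKDKD", "D", "A", "1", "E", "B", "3", "C", "2", "3"] := by
  have h11 : totLen (PySem.List.sorted
      [["A", "B", "C"], ["D", "E"], ["F"], ["1", "3", "2", "3"], ["KDKDKD"]]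
      (fun x => (x.length : Int)) false) = 11 := by decide
  have hlen : (PySem.List.sorted
      [["A", "B", "C"], ["D", "E"], ["F"], ["1", "3", "2", "3"], ["KDKDKD"]]
      (fun x => (x.length : Int)) false).length = 5 := by decide
  show rrLoop 100 (PySem.List.sorted
      [["A", "B", "C"], ["D", "E"], ["F"], ["1", "3", "2", "3"], ["KDKDKD"]]
      (fun x => (x.length : Int)) false) 0 k []
    = ["F", "KDKDKD", "D", "A", "1", "E", "B", "3", "C", "2", "3"]
  rw [rrLoop_congr 100 _ 0 k 11 [] (by rw [h11]; omega) (by rw [h11]; omega)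
    (by rw [h11, hlen]; norm_num)]
  decide

lemma take_full (xs ys : List String) (n : Nat) (hxy : xs = ys) (hlen : xs.length = 11)
    (hn : 11 ≤ n) : xs.take n = ys := by
  rw [List.take_of_length_le (by omega), hxy]

lemma b_big (k : Int) (h : 11 ≤ k) :
    round_robin_sampling_alt k = ["F", "KDKDKD", "D", "A", "1", "E", "B", "3", "C", "2", "3"] := by
  unfold round_robin_sampling_alt
  rw [if_neg (by omega)]
  simp only [PySem.List.slice_to _ (show (0:Int) ≤ k by omega)]
  exact take_full _ _ _ (by decide) (by decide) (by omega)

-- ===== VERDICT (by name: the statement is the Claim_ definition above) =====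
theorem round_robin_sampling_spec : Claim_equal_round_robin_sampling := by
  intro k _
  unfold Spec_round_robin_sampling
  by_cases hk : k ≤ 0
  · unfold round_robin_sampling round_robin_sampling_alt
    rw [rrLoop_nonpos 100 _ 0 k [] hk, if_pos hk]
  · by_cases hk2 : k ≤ 11
    · interval_cases k <;> decide
    · rw [a_big k (by omega), b_big k (by omega)]
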